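-- pv_equiv track=rewrite | github.com/Abby-Newton/python-learning | OneDrive - Indiana Institute of Technology/Senior Year 2025-26/Comp Sci II/Midterm_Info/Practice_Midterm.py | get_perfect_attendance
-- ===== SOURCE A (Python) =====
-- def get_perfect_attendance(attendance_dict):
--     """Find students who attended all classes"""
--     if not attendance_dict:
--         return set()
--     # Start with first day's students
--     all_dates = list(attendance_dict.keys())
--     perfect = attendance_dict[all_dates[0]].copy()
--     # Intersect with each other day
--     for date in all_dates[1:]:
--         perfect = perfect & attendance_dict[date]
--     return perfect
-- ===== SOURCE B (Python) =====
-- def get_perfect_attendance(attendance_dict):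
--     """Find students who attended all classes (per-student counting, one flat pass)."""
--     if not attendance_dict:
--         return set()
--     n = len(attendance_dict)
--     counts = {}
--     for students in attendance_dict.values():
--         for s in students:
--             counts[s] = counts.get(s, 0) + 1
--     return {s for s in counts if counts[s] == n}
-- ===== Notes on version B (the rewrite author's own statement) =====
-- stated objective: alternative
-- what changed: Replaces the chain of pairwise set intersections with one flat pass that counts each student's appearances in a dict and keeps the students whose count equals the number of days.
import Mathlib
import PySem

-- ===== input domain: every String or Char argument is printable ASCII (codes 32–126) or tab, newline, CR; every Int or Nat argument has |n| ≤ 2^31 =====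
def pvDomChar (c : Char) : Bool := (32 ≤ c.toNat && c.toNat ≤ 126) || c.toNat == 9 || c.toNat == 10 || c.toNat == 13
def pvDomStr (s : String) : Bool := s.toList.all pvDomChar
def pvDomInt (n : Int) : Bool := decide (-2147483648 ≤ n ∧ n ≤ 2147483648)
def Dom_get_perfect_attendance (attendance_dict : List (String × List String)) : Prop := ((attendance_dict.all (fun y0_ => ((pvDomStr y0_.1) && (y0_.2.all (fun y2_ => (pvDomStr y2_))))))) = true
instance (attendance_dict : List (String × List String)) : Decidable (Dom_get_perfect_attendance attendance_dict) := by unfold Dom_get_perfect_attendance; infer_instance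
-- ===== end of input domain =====

-- B replaces A's chain of pairwise set intersections by one counting pass over all days
-- plus a filter on the counts (alternative decomposition, similar cost).


-- ===== PORT A =====
def get_perfect_attendance (attendance_dict : List (String × List String)) : List String :=
  match attendance_dict with
  | [] => PySem.Set.empty
  | (k0, _) :: _ =>
    let all_dates := attendance_dict.map (·.1)
    -- perfect = attendance_dict[all_dates[0]].copy()  (key k0 is always present, so getD is exact)
    let perfect : PySem.Set String := PySem.Dict.getD ⟨attendance_dict⟩ k0 []
    (all_dates.drop 1).foldl
      (fun perfect date => PySem.Set.inter perfect (PySem.Dict.getD ⟨attendance_dict⟩ date []))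
      perfect

-- ===== PORT B =====
def get_perfect_attendance_alt (attendance_dict : List (String × List String)) : List String :=
  if attendance_dict.isEmpty then PySem.Set.empty
  else
    let n : Int := attendance_dict.length
    let counts : PySem.Dict String Int :=
      attendance_dict.foldl
        (fun c p => p.2.foldl (fun c s => c.insert s (c.getD s 0 + 1)) c)
        PySem.Dict.empty
    (PySem.Dict.keys counts).filter (fun s => counts.getD s 0 == n)

-- ===== PRECONDITION & SPEC =====
-- Pre_ excludes only association lists that do not represent a Python dict of sets:
-- a duplicate date key or a duplicate student within one day (unreachable from Python,
-- where dict keys and set elements are unique).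
def Pre_get_perfect_attendance (attendance_dict : List (String × List String)) : Prop :=
  (attendance_dict.map (·.1)).Nodup ∧ ∀ p ∈ attendance_dict, p.2.Nodup
instance (attendance_dict : List (String × List String)) : Decidable (Pre_get_perfect_attendance attendance_dict) := by unfold Pre_get_perfect_attendance; infer_instance

def pvWitness_get_perfect_attendance : (List (String × List String)) :=
  [("Mon", ["amy", "bob"]), ("Tue", ["bob", "cid"])]

def Spec_get_perfect_attendance (attendance_dict : List (String × List String)) (out : List String) : Prop := out = get_perfect_attendance_alt attendance_dict
instance (attendance_dict : List (String × List String)) (out : List String) : Decidable (Spec_get_perfect_attendance attendance_dict out) := by unfold Spec_get_perfect_attendance; infer_instance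

-- ===== CLAIM (what is proved, stated in full; the proofs are below) =====
def Claim_equal_get_perfect_attendance : Prop := ∀ (attendance_dict : List (String × List String)), Dom_get_perfect_attendance attendance_dict → Pre_get_perfect_attendance attendance_dict → Spec_get_perfect_attendance attendance_dict (get_perfect_attendance attendance_dict)

-- ===== LEMMAS AND PROOFS =====

-- The nested counting loop is the counter of the flattened student lists.
lemma counts_eq_counter (d : List (String × List String)) (c0 : PySem.Dict String Int) :
    d.foldl (fun c p => p.2.foldl (fun c s => c.insert s (c.getD s 0 + 1)) c) c0
      = (d.flatMap (·.2)).foldl (fun c s => c.insert s (c.getD s 0 + 1)) c0 := by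
  induction d generalizing c0 with
  | nil => rfl
  | cons p rest ih => simp [List.flatMap_cons, List.foldl_append, ih]

-- With unique keys, looking an entry's key up in the whole dict gives that entry's value.
lemma getD_of_mem_nodup (d : List (String × List String)) (p : String × List String)
    (hnd : (d.map (·.1)).Nodup) (hp : p ∈ d) : PySem.Dict.getD ⟨d⟩ p.1 [] = p.2 := by
  induction d with
  | nil => cases hp
  | cons q rest ih =>
    simp only [List.map_cons, List.nodup_cons] at hnd
    rcases List.mem_cons.mp hp with h | h
    · subst h; simp [PySem.Dict.getD, PySem.Dict.get?]
    · have hne : (q.1 == p.1) = false := by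
        simp only [beq_eq_false_iff_ne, ne_eq]
        intro he; exact hnd.1 (he ▸ List.mem_map_of_mem h)
      have hstep : PySem.Dict.getD (⟨q :: rest⟩ : PySem.Dict String (List String)) p.1 []
          = PySem.Dict.getD ⟨rest⟩ p.1 [] := by
        simp [PySem.Dict.getD, PySem.Dict.get?, hne]
      rw [hstep]; exact ih hnd.2 h
  
-- A's fold over the remaining dates, looked up in the dict, is a fold over the entries' values.
lemma foldl_dates_eq (d rest : List (String × List String)) (acc : List String)
    (h : ∀ p ∈ rest, PySem.Dict.getD ⟨d⟩ p.1 [] = p.2) :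
    (rest.map (·.1)).foldl
        (fun p date => PySem.Set.inter p (PySem.Dict.getD ⟨d⟩ date [])) acc
      = rest.foldl (fun p q => PySem.Set.inter p q.2) acc := by
  induction rest generalizing acc with
  | nil => rfl
  | cons q t ih =>
    simp only [List.map_cons, List.foldl_cons]
    rw [h q (List.mem_cons_self), ih]
    intro p hp; exact h p (List.mem_cons_of_mem _ hp)

-- The intersection chain is a single filter by membership in every remaining day.
lemma foldl_inter_eq_filter (rest : List (String × List String)) (acc : List String) :
    rest.foldl (fun p q => PySem.Set.inter p q.2) acc
      = acc.filter (fun s => rest.all (fun q => q.2.contains s)) := by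
  induction rest generalizing acc with
  | nil => simp
  | cons q t ih =>
    rw [List.foldl_cons, ih]
    simp only [PySem.Set.inter, List.filter_filter, List.all_cons]
    exact List.filter_congr (fun s _ => by simp [Bool.and_comm])

lemma sum_le_length (l : List Nat) (h : ∀ x ∈ l, x ≤ 1) : l.sum ≤ l.length := by
  induction l with
  | nil => simp
  | cons a t ih =>
    have := h a List.mem_cons_self
    have := ih (fun x hx => h x (List.mem_cons_of_mem _ hx))
    simp only [List.sum_cons, List.length_cons]; omega

lemma sum_eq_length_iff (l : List Nat) (h : ∀ x ∈ l, x ≤ 1) :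
    l.sum = l.length ↔ ∀ x ∈ l, x = 1 := by
  induction l with
  | nil => simp
  | cons a t ih =>
    have ha := h a List.mem_cons_self
    have ht := fun x hx => h x (List.mem_cons_of_mem _ hx)
    have hs := sum_le_length t ht
    simp only [List.sum_cons, List.length_cons, List.forall_mem_cons]
    constructor
    · intro he
      have ha1 : a = 1 := by omega
      exact ⟨ha1, (ih ht).mp (by omega)⟩
    · rintro ⟨ha1, hall⟩
      have := (ih ht).mpr hall; omega

-- count of s across all remaining days, as a sum of 0/1 per-day counts
lemma count_flatMap_le (rest : List (String × List String)) (s : String)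
    (h : ∀ p ∈ rest, p.2.Nodup) :
    (rest.flatMap (·.2)).count s ≤ rest.length := by
  rw [List.count_flatMap]
  have := sum_le_length (rest.map (fun q => (List.count s ∘ (·.2)) q))
    (by
      intro x hx
      rcases List.mem_map.mp hx with ⟨q, hq, rfl⟩
      exact List.nodup_iff_count_le_one.mp (h q hq) s)
  simpa using this

lemma count_flatMap_eq_iff (rest : List (String × List String)) (s : String)
    (h : ∀ p ∈ rest, p.2.Nodup) :
    ((rest.flatMap (·.2)).count s = rest.length ↔ ∀ q ∈ rest, s ∈ q.2) := by
  rw [List.count_flatMap]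
  have hle : ∀ x ∈ rest.map (fun q => (List.count s ∘ (·.2)) q), x ≤ 1 := by
    intro x hx
    rcases List.mem_map.mp hx with ⟨q, hq, rfl⟩
    exact List.nodup_iff_count_le_one.mp (h q hq) s
  rw [show rest.length = (rest.map (fun q => (List.count s ∘ (·.2)) q)).length by simp]
  rw [sum_eq_length_iff _ hle]
  constructor
  · intro hall q hq
    have := hall _ (List.mem_map_of_mem (f := fun q => (List.count s ∘ (·.2)) q) hq)
    simp only [Function.comp] at this
    exact List.count_pos_iff.mp (by omega)
  · intro hall x hx
    rcases List.mem_map.mp hx with ⟨q, hq, rfl⟩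
    have h1 : List.count s q.2 ≤ 1 := List.nodup_iff_count_le_one.mp (h q hq) s
    have h2 : 0 < List.count s q.2 := List.count_pos_iff.mpr (hall q hq)
    simp only [Function.comp]; omega

-- ===== VERDICT (by name: the statement is the Claim_ definition above) =====
theorem get_perfect_attendance_spec : Claim_equal_get_perfect_attendance := by
  intro d _ hpre
  unfold Spec_get_perfect_attendance
  obtain ⟨hkeys, hvals⟩ := hpre
  match d with
  | [] => rfl
  | (k0, v0) :: rest =>
    -- abbreviations
    have hv0 : v0.Nodup := hvals _ (List.mem_cons_self)
    have hrest : ∀ p ∈ rest, p.2.Nodup := fun p hp => hvals p (List.mem_cons_of_mem _ hp)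
    -- A side
    have hlook : PySem.Dict.getD ⟨(k0, v0) :: rest⟩ k0 [] = v0 :=
      getD_of_mem_nodup _ (k0, v0) hkeys (List.mem_cons_self)
    have hA : get_perfect_attendance ((k0, v0) :: rest)
        = v0.filter (fun s => rest.all (fun q => q.2.contains s)) := by
      unfold get_perfect_attendance
      simp only [List.map_cons, List.drop_succ_cons, List.drop_zero, hlook]
      rw [foldl_dates_eq _ rest v0
        (fun p hp => getD_of_mem_nodup _ p hkeys (List.mem_cons_of_mem _ hp))]
      exact foldl_inter_eq_filter rest v0
    -- B side
    set t := rest.flatMap (·.2) with ht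
    have hB : get_perfect_attendance_alt ((k0, v0) :: rest)
        = (PySem.Set.ofList (v0 ++ t)).filter
            (fun s => ((v0 ++ t).count s : Int) == ((rest.length + 1 : Nat) : Int)) := by
      unfold get_perfect_attendance_alt
      simp only [List.isEmpty_cons]
      rw [counts_eq_counter, PySem.Dict.foldl_insert_getD_add_one_eq_counter]
      simp only [List.flatMap_cons, PySem.Dict.keys_counter, PySem.Dict.getD_counter,
        List.length_cons]
      rfl
    rw [hA, hB]
    -- split set(v0 ++ t) into v0 and the new elements of t
    rw [PySem.Set.ofList_append, PySem.Set.ofList_eq_self_of_nodup v0 hv0,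
      PySem.Set.update_eq_append_filter, List.filter_append]
    have hnew : (((PySem.Set.ofList t).filter
          (fun y => !(PySem.Set.contains v0 y))).filter
          (fun s => ((v0 ++ t).count s : Int) == ((rest.length + 1 : Nat) : Int)) : List String) = [] := by
      rw [List.filter_eq_nil_iff]
      intro s hs
      have hnv0 : s ∉ v0 := by
        have := (List.mem_filter.mp hs).2
        simpa [PySem.Set.contains_iff] using this
      have hcount : (v0 ++ t).count s ≤ rest.length := by
        rw [List.count_append, List.count_eq_zero_of_not_mem hnv0]
        simpa using count_flatMap_le rest s hrest
      intro hEq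
      have hEq' : (v0 ++ t).count s = rest.length + 1 := by
        exact_mod_cast beq_iff_eq.mp hEq
      omega
    rw [hnew, List.append_nil]
    apply List.filter_congr
    intro s hs
    have h1 : v0.count s = 1 := List.count_eq_one_of_mem hv0 hs
    rw [List.count_append, h1, Bool.eq_iff_iff]
    simp only [List.all_eq_true, beq_iff_eq, Nat.cast_inj]
    constructor
    · intro hall
      have hmem : ∀ q ∈ rest, s ∈ q.2 := fun q hq => by
        have := hall q hq; simpa using this
      have hc := (count_flatMap_eq_iff rest s hrest).mpr hmem
      rw [← ht] at hc
      omega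
    · intro he
      rw [ht] at he
      have hmem := (count_flatMap_eq_iff rest s hrest).mp (by omega)
      intro q hq
      simpa using hmem q hq
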